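-- pv_equiv track=rewrite | github.com/vadimsv1/agent-security-benchmark | mcpguard/scanners/input_scanner.py | _iter_patterns
-- ===== SOURCE A (Python) =====
-- def _iter_patterns(text: str, patterns: list[str]) -> list[tuple[int, int, str]]:
--     """Case-insensitive literal substring matches. Returns (start, end, pattern)."""
--     out = []
--     lower = text.lower()
--     for p in patterns:
--         pl = p.lower()
--         start = 0
--         while True:
--             idx = lower.find(pl, start)
--             if idx < 0:
--                 break
--             out.append((idx, idx + len(p), p))
--             start = idx + len(p)
--     return out
-- ===== SOURCE B (Python) =====
-- def _iter_patterns(text: str, patterns: list[str]) -> list[tuple[int, int, str]]: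
--     """Case-insensitive literal substring matches. Returns (start, end, pattern).
--
--     Two staged passes instead of A's interleaved find loops: one text-major scan
--     collects every occurrence of every pattern (overlapping included), then a
--     second pass greedily filters each pattern's occurrence list to the
--     non-overlapping ones, in pattern order."""
--     lower = text.lower()
--     n = len(lower)
--     pls = [p.lower() for p in patterns]
--     occ = [[] for _ in pls]
--     pairs = list(zip(occ, pls))
--     for i in range(n):
--         for l, pl in pairs:
--             if lower[i:i + len(pl)] == pl:
--                 l.append(i)
--     out = []
--     for p, lst in zip(patterns, occ):
--         m = len(p)
--         end = 0
--         for i in lst: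
--             if end <= i:
--                 out.append((i, i + m, p))
--                 end = i + m
--     return out
-- ===== Notes on version B (the rewrite author's own statement) =====
-- stated objective: alternative
-- what changed: B replaces A's per-pattern interleaved find loops by two staged passes: a text-major scan that collects all (overlapping) occurrences of every pattern at once, then a per-pattern greedy non-overlap filter over the collected occurrence lists.
import Mathlib
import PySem

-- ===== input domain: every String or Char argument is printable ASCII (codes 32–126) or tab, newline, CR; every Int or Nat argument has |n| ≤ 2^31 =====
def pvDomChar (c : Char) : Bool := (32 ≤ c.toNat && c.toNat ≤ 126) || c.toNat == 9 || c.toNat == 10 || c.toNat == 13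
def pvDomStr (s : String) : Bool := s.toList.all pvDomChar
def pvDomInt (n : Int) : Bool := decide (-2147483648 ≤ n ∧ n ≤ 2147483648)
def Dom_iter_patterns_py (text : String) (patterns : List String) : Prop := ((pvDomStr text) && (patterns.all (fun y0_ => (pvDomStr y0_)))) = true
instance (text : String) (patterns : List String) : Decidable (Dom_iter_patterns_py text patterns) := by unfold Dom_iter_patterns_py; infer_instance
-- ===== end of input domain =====

-- B replaces A's per-pattern interleaved find loops by two staged passes — a text-major
-- scan collecting every (overlapping) occurrence of every pattern, then a per-pattern
-- greedy non-overlap filter over the collected lists; objective: alternative.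


-- ===== PORT A =====
-- inner `while True` loop of A; `fuel` only makes the Python loop total in Lean
-- (on an empty pattern Python's loop never terminates; such inputs are outside Pre_,
-- and for a non-empty pattern `hay.length + 1` rounds always suffice).
def pvLoopA (hay pl : List Char) (p : String) (m : Nat) : Nat → Int → List (Int × Int × String)
  | 0, _ => []
  | fuel + 1, start =>
      let idx := PySem.Chars.findFrom hay pl start none   -- lower.find(pl, start)
      if idx < 0 then []
      else (idx, idx + (m : Int), p) :: pvLoopA hay pl p m fuel (idx + (m : Int))

def iter_patterns_py (text : String) (patterns : List String) : List (Int × Int × String) :=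
  let lower := (PySem.Str.lower text).toList
  patterns.foldl (fun out p =>
    out ++ pvLoopA lower (PySem.Str.lower p).toList p p.toList.length (lower.length + 1) 0) []

-- ===== PORT B =====
-- `lower[i:i+len(pl)] == pl` is `PySem.List.slice hay i (i+len pl) = pl`; stage 1's
-- in-place appends over `zip(occ, pls)` are the zipWith rebuilding occ, the stage-2 loop
-- over `zip(patterns, occ)` is the foldl over the zip.
def iter_patterns_py_alt (text : String) (patterns : List String) : List (Int × Int × String) :=
  let hay := (PySem.Str.lower text).toList
  let n : Int := hay.length
  let pls := patterns.map (fun p => (PySem.Str.lower p).toList)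
  let occ := (PySem.List.pyRange 0 n 1).foldl
    (fun occ i => List.zipWith
      (fun l pl => if PySem.List.slice hay (some i) (some (i + (pl.length : Int))) = pl then l ++ [i] else l)
      occ pls)
    (pls.map (fun _ => ([] : List Int)))
  (patterns.zip occ).foldl (fun out pr =>
    ((pr.2).foldl (fun st i =>
        if st.1 ≤ i then (i + (pr.1.toList.length : Int), st.2 ++ [(i, i + (pr.1.toList.length : Int), pr.1)]) else st)
      ((0 : Int), out)).2) []

-- ===== PRECONDITION & SPEC =====
-- Pre_ excludes pattern lists containing the empty string: on those A's `while True`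
-- loop never terminates (find("", start) returns start and start never advances).
def Pre_iter_patterns_py (text : String) (patterns : List String) : Prop :=
  ∀ p ∈ patterns, p ≠ ""
instance (text : String) (patterns : List String) : Decidable (Pre_iter_patterns_py text patterns) := by unfold Pre_iter_patterns_py; infer_instance

def pvWitness_iter_patterns_py : String × List String := ("aAbab", ["ab", "b", "zz"])

def Spec_iter_patterns_py (text : String) (patterns : List String) (out : List (Int × Int × String)) : Prop := out = iter_patterns_py_alt text patterns
instance (text : String) (patterns : List String) (out : List (Int × Int × String)) : Decidable (Spec_iter_patterns_py text patterns out) := by unfold Spec_iter_patterns_py; infer_instance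

-- ===== CLAIM (what is proved, stated in full; the proofs are below) =====
def Claim_equal_iter_patterns_py : Prop := ∀ (text : String) (patterns : List String), Dom_iter_patterns_py text patterns → Pre_iter_patterns_py text patterns → Spec_iter_patterns_py text patterns (iter_patterns_py text patterns)

-- ===== LEMMAS AND PROOFS =====

-- findFrom returns -1 when no occurrence starts at or after k
theorem pvFindFrom_none (hay pl : List Char) (k : Nat) (hk : k ≤ hay.length)
    (h : ∀ i, k ≤ i → ¬ pl <+: hay.drop i) :
    PySem.Chars.findFrom hay pl (k : Int) none = -1 := by
  rw [PySem.Chars.findFrom_natCast_eq_neg_one_iff hay pl k hk]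
  intro hinf
  rcases (PySem.Chars.exists_prefix_drop_iff_isIn pl (hay.drop k)).mpr
      ((PySem.Chars.isIn_iff_infix pl (hay.drop k)).mpr hinf) with ⟨j, hj⟩
  rw [List.drop_drop] at hj
  exact h (k + j) (by omega) hj

-- findFrom returns j when j is the first occurrence at or after k
theorem pvFindFrom_first (hay pl : List Char) (k j : Nat) (hk : k ≤ hay.length)
    (hkj : k ≤ j) (hj : pl <+: hay.drop j)
    (hmin : ∀ i, k ≤ i → i < j → ¬ pl <+: hay.drop i) :
    PySem.Chars.findFrom hay pl (k : Int) none = (j : Int) := by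
  have hne : PySem.Chars.findFrom hay pl (k : Int) none ≠ -1 := by
    intro h
    apply (PySem.Chars.findFrom_natCast_eq_neg_one_iff hay pl k hk).mp h
    rw [← PySem.Chars.isIn_iff_infix, ← PySem.Chars.exists_prefix_drop_iff_isIn]
    exact ⟨j - k, by rw [List.drop_drop, Nat.add_sub_cancel' hkj]; exact hj⟩
  obtain ⟨h1, h2, h3⟩ := PySem.Chars.findFrom_natCast_spec hay pl k hk hne
  set r := PySem.Chars.findFrom hay pl (k : Int) none with hr
  have hr0 : 0 ≤ r := le_trans (by exact_mod_cast Nat.zero_le k) h1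
  have hkr : k ≤ r.toNat := by omega
  have hjr : ¬ r.toNat < j := fun hlt => hmin r.toNat hkr hlt h2
  have hrj : ¬ j < r.toNat := fun hlt => h3 j (by exact_mod_cast hkj) (by exact_mod_cast hlt) hj
  omega

-- a non-empty pattern matching at i fits inside the text
theorem pvPrefix_bound (hay pl : List Char) (i : Nat) (hm : 1 ≤ pl.length)
    (h : pl <+: hay.drop i) : i + pl.length ≤ hay.length := by
  have h1 := h.length_le
  rw [List.length_drop] at h1
  omega

-- skipping a non-matching position does not change find
theorem pvFindFrom_succ (hay pl : List Char) (s : Nat) (hs : s + 1 ≤ hay.length)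
    (hnp : ¬ pl <+: hay.drop s) :
    PySem.Chars.findFrom hay pl (s : Int) none
      = PySem.Chars.findFrom hay pl ((s + 1 : Nat) : Int) none := by
  by_cases hex : ∃ j, pl <+: hay.drop (s + 1 + j)
  · have hj0 := Nat.find_spec hex
    have hmin : ∀ i, s ≤ i → i < s + 1 + Nat.find hex → ¬ pl <+: hay.drop i := by
      intro i hi hilt hp
      rcases Nat.lt_or_ge s i with h | h
      · exact Nat.find_min hex (m := i - s - 1) (by omega)
          (by rw [show s + 1 + (i - s - 1) = i by omega]; exact hp)
      · have hi' : i = s := by omega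
        exact hnp (hi' ▸ hp)
    rw [pvFindFrom_first hay pl s (s + 1 + Nat.find hex) (by omega) (by omega) hj0 hmin,
        pvFindFrom_first hay pl (s + 1) (s + 1 + Nat.find hex) hs (by omega) hj0
          (fun i hi hilt hp => hmin i (by omega) hilt hp)]
  · have h1 : ∀ i, s ≤ i → ¬ pl <+: hay.drop i := by
      intro i hi hp
      rcases Nat.lt_or_ge s i with h | h
      · exact hex ⟨i - s - 1, by rw [show s + 1 + (i - s - 1) = i by omega]; exact hp⟩
      · have hi' : i = s := by omega
        exact hnp (hi' ▸ hp)
    rw [pvFindFrom_none hay pl s (by omega) h1,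
        pvFindFrom_none hay pl (s + 1) hs (fun i hi hp => h1 i (by omega) hp)]

-- the guarded position scan from s with non-overlap bound e equals A's find loop from max s e
theorem pvScan (hay pl : List Char) (p : String) (m : Nat) (hm : 1 ≤ m)
    (hlen : pl.length = m) :
    ∀ (k s e fuel : Nat) (acc : List (Int × Int × String)),
      (((hay.length : Int) - m + 1).toNat - s) ≤ k → s ≤ hay.length → e ≤ hay.length →
      hay.length + 1 - max s e ≤ fuel →
      ((PySem.List.pyRange (s : Int) ((hay.length : Int) - m + 1) 1).foldl
        (fun st i =>
          if st.1 ≤ i ∧ pl.isPrefixOf (hay.drop i.toNat) then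
            (i + (m : Int), st.2 ++ [(i, i + (m : Int), p)])
          else st)
        ((e : Int), acc)).2
      = acc ++ pvLoopA hay pl p m fuel ((max s e : Nat) : Int) := by
  intro k
  induction k with
  | zero =>
    intro s e fuel acc hk hs he hfuel
    have hNs : ((hay.length : Int) - m + 1) ≤ (s : Int) := by omega
    rw [PySem.List.pyRange_one_eq_nil hNs]
    obtain ⟨f, rfl⟩ : ∃ f, fuel = f + 1 := ⟨fuel - 1, by omega⟩
    simp only [List.foldl_nil, pvLoopA]
    rw [pvFindFrom_none hay pl (max s e) (by omega) (fun i hi hp => ?_)]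
    · simp
    · have hb := pvPrefix_bound hay pl i (by omega) hp
      omega
  | succ k ih =>
    intro s e fuel acc hk hs he hfuel
    by_cases hNs : ((hay.length : Int) - m + 1) ≤ (s : Int)
    · rw [PySem.List.pyRange_one_eq_nil hNs]
      obtain ⟨f, rfl⟩ : ∃ f, fuel = f + 1 := ⟨fuel - 1, by omega⟩
      simp only [List.foldl_nil, pvLoopA]
      rw [pvFindFrom_none hay pl (max s e) (by omega) (fun i hi hp => ?_)]
      · simp
      · have hb := pvPrefix_bound hay pl i (by omega) hp
        omega
    · rw [not_le] at hNs
      have hs1 : s + m ≤ hay.length := by omega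
      rw [PySem.List.pyRange_one_cons hNs]
      simp only [List.foldl_cons, Int.toNat_natCast]
      by_cases he1 : (e : Int) ≤ (s : Int)
      · have hes : e ≤ s := by exact_mod_cast he1
        by_cases hp : pl.isPrefixOf (hay.drop s)
        · rw [if_pos ⟨he1, hp⟩]
          have hpre : pl <+: hay.drop s := List.isPrefixOf_iff_prefix.mp hp
          have : ((s : Int) + 1) = ((s + 1 : Nat) : Int) := by push_cast; ring
          rw [this]
          have hrec := ih (s + 1) (s + m) (fuel - 1) (acc ++ [((s : Int), (s : Int) + m, p)])
            (by omega) (by omega) (by omega) (by rw [Nat.max_eq_right (by omega)]; omega)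
          have hcast : ((s + m : Nat) : Int) = (s : Int) + m := by push_cast; ring
          rw [hcast] at hrec
          rw [hrec, Nat.max_eq_right (show s + 1 ≤ s + m by omega)]
          obtain ⟨f, rfl⟩ : ∃ f, fuel = f + 1 := ⟨fuel - 1, by omega⟩
          rw [Nat.max_eq_left hes]
          simp only [pvLoopA]
          rw [pvFindFrom_first hay pl s s (by omega) le_rfl hpre (fun i h1 h2 => by omega)]
          simp only [show ¬ ((s : Int) < 0) by omega, List.append_assoc,
            List.singleton_append, hcast]
          simp
        · rw [if_neg (by rintro ⟨-, h⟩; exact hp h)]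
          have : ((s : Int) + 1) = ((s + 1 : Nat) : Int) := by push_cast; ring
          rw [this]
          have hrec := ih (s + 1) e fuel acc (by omega) (by omega) he
            (by omega)
          rw [hrec, Nat.max_eq_left (show e ≤ s + 1 by omega), Nat.max_eq_left hes]
          have hff := pvFindFrom_succ hay pl s (by omega)
            (fun h => hp (List.isPrefixOf_iff_prefix.mpr h))
          obtain ⟨f, rfl⟩ : ∃ f, fuel = f + 1 := ⟨fuel - 1, by omega⟩
          simp only [pvLoopA, hff]
      · rw [if_neg (by rintro ⟨h, -⟩; exact he1 h)]
        have hse : s < e := by omega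
        have : ((s : Int) + 1) = ((s + 1 : Nat) : Int) := by push_cast; ring
        rw [this]
        rw [ih (s + 1) e fuel acc (by omega) (by omega) he
          (by rw [Nat.max_eq_right (show s + 1 ≤ e by omega)]
              rw [Nat.max_eq_right (le_of_lt hse)] at hfuel; omega)]
        rw [Nat.max_eq_right (show s + 1 ≤ e by omega), Nat.max_eq_right (le_of_lt hse)]

-- a fold whose step is the identity on every list element leaves the state unchanged
theorem pvFoldlNoop {α β : Type} (l : List β) (f : α → β → α)
    (h : ∀ i ∈ l, ∀ st, f st i = st) (init : α) : l.foldl f init = init := by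
  induction l generalizing init with
  | nil => rfl
  | cons i l ih =>
    simp only [List.foldl_cons, h i (by simp)]
    exact ih (fun j hj st => h j (by simp [hj]) st) init

-- the slice test of B's stage 1 is exactly a prefix test at position i
theorem pvSliceIff (hay pl : List Char) (i : Int) (hi : 0 ≤ i) :
    PySem.List.slice hay (some i) (some (i + (pl.length : Int))) = pl
      ↔ pl <+: hay.drop i.toNat := by
  rw [PySem.List.slice_toNat hay hi (by omega)]
  have hlen : (i + (pl.length : Int)).toNat - i.toNat = pl.length := by omega
  rw [hlen]
  constructor
  · intro h
    rw [← h]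
    exact List.take_prefix _ _
  · rintro ⟨t, ht⟩
    rw [← ht, List.take_left']
    rfl

-- restricting B's scan range [0, n) to A's [0, n-m+1) drops only guaranteed non-matches
theorem pvTrim (hay pl : List Char) (p : String) (m : Nat) (hm : 1 ≤ m)
    (hlen : pl.length = m) (init : Int × List (Int × Int × String)) :
    (PySem.List.pyRange 0 (hay.length : Int) 1).foldl
      (fun st i =>
        if st.1 ≤ i ∧ pl.isPrefixOf (hay.drop i.toNat) then
          (i + (m : Int), st.2 ++ [(i, i + (m : Int), p)])
        else st) init
    = (PySem.List.pyRange 0 ((hay.length : Int) - m + 1) 1).foldl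
      (fun st i =>
        if st.1 ≤ i ∧ pl.isPrefixOf (hay.drop i.toNat) then
          (i + (m : Int), st.2 ++ [(i, i + (m : Int), p)])
        else st) init := by
  have noop : ∀ i : Int, (hay.length : Int) - m < i → ∀ st : Int × List (Int × Int × String),
      (if st.1 ≤ i ∧ pl.isPrefixOf (hay.drop i.toNat) then
        (i + (m : Int), st.2 ++ [(i, i + (m : Int), p)]) else st) = st := by
    intro i hi st
    rw [if_neg]
    rintro ⟨-, hp⟩
    have hb := pvPrefix_bound hay pl i.toNat (by omega)
      (List.isPrefixOf_iff_prefix.mp hp)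
    omega
  by_cases h : (hay.length : Int) - m + 1 ≤ 0
  · rw [PySem.List.pyRange_one_eq_nil h, List.foldl_nil]
    exact pvFoldlNoop _ _ (fun i hi st => by
      have := (PySem.List.mem_pyRange_one.mp hi)
      exact noop i (by omega) st) init
  · rw [PySem.List.pyRange_one_append 0 ((hay.length : Int) - m + 1) (hay.length : Int)
        (by omega) (by omega), List.foldl_append]
    exact pvFoldlNoop _ _ (fun i hi st => by
      have := (PySem.List.mem_pyRange_one.mp hi)
      exact noop i (by omega) st) _

-- one pattern: B's collect-then-filter equals A's find loop
theorem pvPerPattern (hay : List Char) (p : String) (hp : p ≠ "")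
    (out : List (Int × Int × String)) :
    (((PySem.List.pyRange 0 (hay.length : Int) 1).foldl
        (fun l i =>
          if PySem.List.slice hay (some i) (some (i + (((PySem.Str.lower p).toList.length : Nat) : Int))) = (PySem.Str.lower p).toList
          then l ++ [i] else l) []).foldl
      (fun st i =>
        if st.1 ≤ i then (i + (p.toList.length : Int), st.2 ++ [(i, i + (p.toList.length : Int), p)]) else st)
      ((0 : Int), out)).2
    = out ++ pvLoopA hay (PySem.Str.lower p).toList p p.toList.length (hay.length + 1) 0 := by
  have hm : 1 ≤ p.toList.length := by
    have hne : p.toList ≠ [] := by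
      intro h
      apply hp
      rwa [String.toList_eq_nil_iff] at h
    cases hl : p.toList with
    | nil => exact absurd hl hne
    | cons a l => simp
  have hlen : (PySem.Str.lower p).toList.length = p.toList.length := by
    simp [PySem.Str.toList_lower, PySem.Chars.lower]
  -- stage 1 collects, stage 2 filters: fuse the two folds into one guarded scan
  rw [PySem.List.foldl_append_ite_eq_filter, List.nil_append,
      ← PySem.List.foldl_ite_eq_foldl_filter]
  -- on range members the slice test is the prefix test; merge the two guards
  have hcongr :
      (PySem.List.pyRange 0 (hay.length : Int) 1).foldl
        (fun (st : Int × List (Int × Int × String)) i =>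
          if PySem.List.slice hay (some i) (some (i + (((PySem.Str.lower p).toList.length : Nat) : Int))) = (PySem.Str.lower p).toList then
            if st.1 ≤ i then (i + (p.toList.length : Int), st.2 ++ [(i, i + (p.toList.length : Int), p)]) else st
          else st)
        ((0 : Int), out)
      = (PySem.List.pyRange 0 (hay.length : Int) 1).foldl
        (fun (st : Int × List (Int × Int × String)) i =>
          if st.1 ≤ i ∧ ((PySem.Str.lower p).toList).isPrefixOf (hay.drop i.toNat) then
            (i + (p.toList.length : Int), st.2 ++ [(i, i + (p.toList.length : Int), p)])
          else st)
        ((0 : Int), out) := by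
    apply PySem.List.foldl_congr_mem'
    intro i hi st
    have h0 : (0 : Int) ≤ i := (PySem.List.mem_pyRange_one.mp hi).1
    have hiff := pvSliceIff hay (PySem.Str.lower p).toList i h0
    by_cases hc : ((PySem.Str.lower p).toList).isPrefixOf (hay.drop i.toNat)
    · rw [if_pos (hiff.mpr (List.isPrefixOf_iff_prefix.mp hc))]
      by_cases hb : st.1 ≤ i
      · rw [if_pos hb, if_pos ⟨hb, hc⟩]
      · rw [if_neg hb, if_neg (by rintro ⟨h, -⟩; exact hb h)]
    · rw [if_neg (fun h => hc (List.isPrefixOf_iff_prefix.mpr (hiff.mp h))),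
          if_neg (by rintro ⟨-, h⟩; exact hc h)]
  rw [hcongr]
  rw [pvTrim hay (PySem.Str.lower p).toList p p.toList.length hm hlen]
  have h := pvScan hay (PySem.Str.lower p).toList p p.toList.length hm hlen
    ((hay.length : Int) - p.toList.length + 1).toNat 0 0 (hay.length + 1) out
    (by omega) (by omega) (by omega) (by omega)
  simpa using h

-- zipWith against a map of the same list is a map
theorem pvZipWithMapLeft {α β γ : Type} (l : List α) (g : α → β) (f : β → α → γ) :
    List.zipWith f (l.map g) l = l.map (fun x => f (g x) x) := by
  induction l with
  | nil => rfl
  | cons a l ih => simp [ih]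

theorem pvZipWithMapRight {α β γ : Type} (l : List α) (g : α → β) (f : α → β → γ) :
    List.zipWith f l (l.map g) = l.map (fun x => f x (g x)) := by
  induction l with
  | nil => rfl
  | cons a l ih => simp [ih]

-- stage 1's text-major zipWith fold computes each pattern's scan independently
theorem pvStage1 {α β : Type} (pls : List β) (f : Int → List α → β → List α) :
    ∀ (is : List Int) (g : β → List α),
      is.foldl (fun occ i => List.zipWith (fun l pl => f i l pl) occ pls) (pls.map g)
      = pls.map (fun pl => is.foldl (fun l i => f i l pl) (g pl)) := by
  intro is
  induction is with
  | nil => intro g; rfl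
  | cons i is ih =>
    intro g
    simp only [List.foldl_cons]
    have hz : List.zipWith (fun l pl => f i l pl) (pls.map g) pls
        = pls.map (fun pl => f i (g pl) pl) := by
      exact pvZipWithMapLeft pls g (fun l pl => f i l pl)
    rw [hz, ih (fun pl => f i (g pl) pl)]

-- zipping a list with its own map pairs each element with its image
theorem pvZipMap {α β : Type} (l : List α) (h : α → β) :
    l.zip (l.map h) = l.map (fun x => (x, h x)) := by
  induction l with
  | nil => rfl
  | cons a l ih => simp [List.zip, pvZipWithMapRight l h Prod.mk]

-- fold the per-pattern equality over the whole pattern list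
theorem pvFolds (hay : List Char) (ps : List String) (h : ∀ p ∈ ps, p ≠ "") :
    ∀ out : List (Int × Int × String),
    ps.foldl (fun out p =>
      (((PySem.List.pyRange 0 (hay.length : Int) 1).foldl
          (fun l i =>
            if PySem.List.slice hay (some i) (some (i + (((PySem.Str.lower p).toList.length : Nat) : Int))) = (PySem.Str.lower p).toList
            then l ++ [i] else l) []).foldl
        (fun st i =>
          if st.1 ≤ i then (i + (p.toList.length : Int), st.2 ++ [(i, i + (p.toList.length : Int), p)]) else st)
        ((0 : Int), out)).2) out
    = ps.foldl (fun out p =>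
        out ++ pvLoopA hay (PySem.Str.lower p).toList p p.toList.length (hay.length + 1) 0) out := by
  induction ps with
  | nil => intro out; rfl
  | cons p ps ih =>
    intro out
    simp only [List.foldl_cons]
    rw [pvPerPattern hay p (h p (by simp)) out]
    exact ih (fun q hq => h q (by simp [hq])) _

-- B's whole body, rewritten pattern-major, equals A's whole body
theorem pvMain (hay : List Char) (ps : List String) (h : ∀ p ∈ ps, p ≠ "") :
    (ps.zip
      ((PySem.List.pyRange 0 (hay.length : Int) 1).foldl
        (fun occ i => List.zipWith
          (fun l pl => if PySem.List.slice hay (some i) (some (i + (pl.length : Int))) = pl then l ++ [i] else l)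
          occ (ps.map (fun p => (PySem.Str.lower p).toList)))
        ((ps.map (fun p => (PySem.Str.lower p).toList)).map (fun _ => ([] : List Int))))).foldl
      (fun out pr =>
        ((pr.2).foldl (fun st i =>
            if st.1 ≤ i then (i + (pr.1.toList.length : Int), st.2 ++ [(i, i + (pr.1.toList.length : Int), pr.1)]) else st)
          ((0 : Int), out)).2) []
    = ps.foldl (fun out p =>
        out ++ pvLoopA hay (PySem.Str.lower p).toList p p.toList.length (hay.length + 1) 0) [] := by
  rw [pvStage1 (ps.map (fun p => (PySem.Str.lower p).toList))
        (fun i l pl => if PySem.List.slice hay (some i) (some (i + (pl.length : Int))) = pl then l ++ [i] else l)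
        (PySem.List.pyRange 0 (hay.length : Int) 1) (fun _ => ([] : List Int)),
      List.map_map, pvZipMap, List.foldl_map]
  exact pvFolds hay ps h []

-- ===== VERDICT (by name: the statement is the Claim_ definition above) =====
theorem iter_patterns_py_spec : Claim_equal_iter_patterns_py := by
  intro text patterns _ hpre
  unfold Spec_iter_patterns_py iter_patterns_py iter_patterns_py_alt
  exact (pvMain (PySem.Str.lower text).toList patterns hpre).symm
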